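-- pv_equiv track=rewrite | github.com/rpolley/Latin-Anki-Scraper | scraper.py | enumerate_ambiguities
-- ===== SOURCE A (Python) =====
-- def enumerate_ambiguities(text):
--     l = [""]
--     for i in range(len(text)):
--         ln = []
--         for word in l:
--             for item in list(text[i]):
--                 ln.append(word+item)
--         l = ln
--     return l
-- ===== SOURCE B (Python) =====
-- def enumerate_ambiguities(text):
--     if not text:
--         return [""]
--     return [item + rest
--             for item in text[0]
--             for rest in enumerate_ambiguities(text[1:])]
-- ===== Notes on version B (the rewrite author's own statement) =====
-- stated objective: alternative
-- what changed: Replaces the iterative prefix-accumulation loop (rebuilding the whole combination list position by position) with divide-and-conquer recursion over the position list: recurse on the tail and prefix each option of the head.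
import Mathlib
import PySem

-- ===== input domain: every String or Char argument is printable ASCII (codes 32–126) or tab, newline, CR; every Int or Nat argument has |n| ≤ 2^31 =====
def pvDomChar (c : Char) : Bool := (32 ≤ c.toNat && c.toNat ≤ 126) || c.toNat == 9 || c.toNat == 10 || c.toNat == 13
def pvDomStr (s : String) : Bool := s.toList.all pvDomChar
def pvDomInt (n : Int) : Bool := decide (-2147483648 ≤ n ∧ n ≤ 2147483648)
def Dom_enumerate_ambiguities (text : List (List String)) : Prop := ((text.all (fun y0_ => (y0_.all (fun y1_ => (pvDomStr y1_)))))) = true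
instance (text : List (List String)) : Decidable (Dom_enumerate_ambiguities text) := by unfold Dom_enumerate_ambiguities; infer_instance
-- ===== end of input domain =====

-- ===== PORT A =====
-- B replaces A's iterative prefix-accumulation loop with structural recursion over the position list (alternative decomposition, same cost class).
-- A: iterative odometer — for each position, rebuild the whole list by appending each option to each prefix.
def enumerate_ambiguities (text : List (List String)) : List String :=
  (PySem.List.pyRange 0 (text.length : Int) 1).foldl
    (fun l i =>
      l.foldl (fun ln word =>
        (PySem.List.pyGetD text i []).foldl (fun ln2 item => ln2 ++ [word ++ item]) ln) [])
    [""]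

-- ===== PORT B =====
-- B: recursion over the position list; the suffix combinations are recomputed per item, as Source B's comprehension does.
def enumerate_ambiguities_alt : List (List String) → List String
  | [] => [""]
  | opts :: rest => opts.flatMap (fun item => (enumerate_ambiguities_alt rest).map (fun r => item ++ r))

-- ===== PRECONDITION & SPEC =====
def Spec_enumerate_ambiguities (text : List (List String)) (out : List String) : Prop := out = enumerate_ambiguities_alt text
instance (text : List (List String)) (out : List String) : Decidable (Spec_enumerate_ambiguities text out) := by unfold Spec_enumerate_ambiguities; infer_instance

-- ===== CLAIM (what is proved, stated in full; the proofs are below) =====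
def Claim_equal_enumerate_ambiguities : Prop := ∀ (text : List (List String)), Dom_enumerate_ambiguities text → Spec_enumerate_ambiguities text (enumerate_ambiguities text)

-- ===== LEMMAS AND PROOFS =====

-- A's one-position step: append each item of opts to each word of l.
def pvStep (l : List String) (opts : List String) : List String :=
  l.foldl (fun ln word => opts.foldl (fun ln2 item => ln2 ++ [word ++ item]) ln) []

theorem pvStep_aux (opts l acc : List String) :
    l.foldl (fun ln word => opts.foldl (fun ln2 item => ln2 ++ [word ++ item]) ln) acc
      = acc ++ l.flatMap (fun word => opts.map (fun item => word ++ item)) := by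
  induction l generalizing acc with
  | nil => simp
  | cons w t ih =>
      rw [List.foldl_cons, PySem.List.foldl_append_singleton_eq_map, ih,
        List.flatMap_cons, List.append_assoc]

theorem pvStep_eq_flatMap (l opts : List String) :
    pvStep l opts = l.flatMap (fun word => opts.map (fun item => word ++ item)) := by
  unfold pvStep
  rw [pvStep_aux]
  rfl

theorem pvFoldl_step_eq (text : List (List String)) :
    ∀ l : List String, text.foldl pvStep l
      = l.flatMap (fun word => (enumerate_ambiguities_alt text).map (fun r => word ++ r)) := by
  induction text with
  | nil =>
      intro l
      simp [enumerate_ambiguities_alt]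
  | cons opts rest ih =>
      intro l
      simp only [List.foldl_cons, ih, pvStep_eq_flatMap, enumerate_ambiguities_alt]
      simp [List.flatMap_assoc, List.flatMap_map, List.map_flatMap, List.map_map,
        Function.comp_def, String.append_assoc]

-- ===== VERDICT (by name: the statement is the Claim_ definition above) =====
theorem enumerate_ambiguities_spec : Claim_equal_enumerate_ambiguities := by
  intro text _
  unfold Spec_enumerate_ambiguities enumerate_ambiguities
  show (PySem.List.pyRange 0 (text.length : Int) 1).foldl
      (fun l i => pvStep l (PySem.List.pyGetD text i [])) [""] = _
  rw [PySem.List.foldl_pyRange_zero_pyGetD' text [] pvStep [""]]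
  rw [pvFoldl_step_eq]
  simp
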